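-- pv_equiv track=rewrite | github.com/igorvanloo/Project-Euler-Explained | Finished Problems/pe00401 - Sum of squares of divisors.py | compute
-- ===== SOURCE A (Python) =====
-- import time, math
--
-- def f(n):
--     return (n*(n+1)*(2*n+1))//6
--
-- def compute(n):
--     total = 0
--     mod = 10**9
--     s = int(math.floor(math.sqrt(n)))
--
--     for k in range(1, s + 1):
--         x = (n//k)
--         t = f(x)
--         total += (t % 10**9)
--         total += pow(k, 2, mod) * x
--         total %= mod
--
--     total -= s*f(s)
--
--     return total % mod
-- ===== SOURCE B (Python) =====
-- def f(n):
--     return (n*(n+1)*(2*n+1))//6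
--
-- def compute(n):
--     # Divisor-block method: group k by the constant value v = n//k.
--     mod = 10**9
--     total = 0
--     lo = 1
--     while lo <= n:
--         v = n // lo
--         hi = n // v
--         total = (total + v * (f(hi) - f(lo - 1))) % mod
--         lo = hi + 1
--     return total
-- ===== Notes on version B (the rewrite author's own statement) =====
-- stated objective: alternative
-- what changed: Replaces A's hyperbola split (loop over k<=sqrt(n) adding f(n//k) and k^2*(n//k), then subtracting s*f(s)) with the divisor-block method: a single while-loop over blocks [lo, n//(n//lo)] on which n//k is constant, adding v*(f(hi)-f(lo-1)) per block.
import Mathlib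
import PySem

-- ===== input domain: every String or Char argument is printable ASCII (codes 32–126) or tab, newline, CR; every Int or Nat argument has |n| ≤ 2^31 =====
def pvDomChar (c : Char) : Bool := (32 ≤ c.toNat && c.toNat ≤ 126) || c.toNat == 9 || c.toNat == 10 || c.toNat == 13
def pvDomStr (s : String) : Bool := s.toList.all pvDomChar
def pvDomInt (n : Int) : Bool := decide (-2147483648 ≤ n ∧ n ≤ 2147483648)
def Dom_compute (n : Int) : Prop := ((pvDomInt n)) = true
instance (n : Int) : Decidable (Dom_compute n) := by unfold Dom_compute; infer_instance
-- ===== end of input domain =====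

-- B replaces A's hyperbola two-sum split by the divisor-block method (group k by the
-- constant value n//k); same O(√n) cost, a genuinely different decomposition of the sum.

-- ===== PORT A =====
-- helper f of Source A
def f (n : Int) : Int := PySem.Int.floordiv (n * (n + 1) * (2 * n + 1)) 6

-- int(math.floor(math.sqrt(n))) is ported as Int.sqrt: exact for every admitted n
-- (0 ≤ n ≤ 2^31, where double-precision sqrt followed by floor equals the integer sqrt).
def compute (n : Int) : Int :=
  let m : Int := 10 ^ 9
  let s : Int := Int.sqrt n
  let total : Int :=
    (PySem.List.pyRange 1 (s + 1) 1).foldl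
      (fun total k =>
        PySem.Int.mod
          (total + PySem.Int.mod (f (PySem.Int.floordiv n k)) (10 ^ 9)
             + PySem.Int.powMod k 2 (10 ^ 9) * PySem.Int.floordiv n k)
          (10 ^ 9)) 0
  PySem.Int.mod (total - s * f s) m

-- ===== PORT B =====
-- helper f of Source B
def fAlt (n : Int) : Int := PySem.Int.floordiv (n * (n + 1) * (2 * n + 1)) 6

-- the while-loop of Source B; fuel = n+1 bounds the iterations (lo strictly increases)
def blockLoop : Nat → Int → Int → Int → Int
  | 0, _, _, total => total
  | fuel + 1, n, lo, total =>
    if lo ≤ n then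
      blockLoop fuel n (PySem.Int.floordiv n (PySem.Int.floordiv n lo) + 1)
        (PySem.Int.mod
          (total + PySem.Int.floordiv n lo *
            (fAlt (PySem.Int.floordiv n (PySem.Int.floordiv n lo)) - fAlt (lo - 1)))
          (10 ^ 9))
    else total

def compute_alt (n : Int) : Int := blockLoop (n.toNat + 1) n 1 0

-- ===== PRECONDITION & SPEC =====
-- Pre_ excludes n < 0, on which A raises ValueError (math.sqrt of a negative number).
def Pre_compute (n : Int) : Prop := 0 ≤ n
instance (n : Int) : Decidable (Pre_compute n) := by unfold Pre_compute; infer_instance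
def pvWitness_compute : Int := (10)

def Spec_compute (n : Int) (out : Int) : Prop := out = compute_alt n
instance (n : Int) (out : Int) : Decidable (Spec_compute n out) := by unfold Spec_compute; infer_instance

-- ===== CLAIM (what is proved, stated in full; the proofs are below) =====
def Claim_equal_compute : Prop := ∀ (n : Int), Dom_compute n → Pre_compute n → Spec_compute n (compute n)

-- ===== LEMMAS AND PROOFS =====

-- Mathematical value both programs compute mod 10^9: Ssum N = Σ_{k=1}^{N} k² ⌊N/k⌋.
def sqSum (x : ℕ) : ℕ := ∑ j ∈ Finset.Ioc 0 x, j ^ 2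
def Ssum (N : ℕ) : ℕ := ∑ k ∈ Finset.Ioc 0 N, k ^ 2 * (N / k)

lemma sixMul (x : ℕ) : x * (x + 1) * (2 * x + 1) = 6 * sqSum x := by
  induction x with
  | zero => simp [sqSum]
  | succ x ih =>
    rw [sqSum, Finset.sum_Ioc_succ_top (Nat.zero_le _), ← sqSum]
    nlinarith [ih]

lemma f_cast (x : ℕ) : f (x : ℤ) = (sqSum x : ℤ) := by
  unfold f
  rw [show ((x : ℤ) * (↑x + 1) * (2 * ↑x + 1)) = ((x * (x + 1) * (2 * x + 1) : ℕ) : ℤ) by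
        push_cast; ring,
      sixMul x, show (6 : ℤ) = ((6 : ℕ) : ℤ) by norm_num, PySem.Int.floordiv_natCast]
  norm_num

lemma fAlt_cast (x : ℕ) : fAlt (x : ℤ) = (sqSum x : ℤ) := f_cast x

lemma sqSum_split (a b : ℕ) (h : a ≤ b) :
    sqSum a + ∑ j ∈ Finset.Ioc a b, j ^ 2 = sqSum b := by
  rw [sqSum, sqSum]
  exact Finset.sum_Ioc_consecutive _ (Nat.zero_le a) h

-- the value of floor division is constant on a block
lemma div_const_on_block (N a k : ℕ) (ha : a < N) (hk1 : a + 1 ≤ k)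
    (hk2 : k ≤ N / (N / (a + 1))) : N / k = N / (a + 1) := by
  set v := N / (a + 1) with hv
  have hv1 : 1 ≤ v := (Nat.one_le_div_iff (by omega)).2 (by omega)
  have hle : N / k ≤ v := by
    rw [hv]; exact Nat.div_le_div_left hk1 (by omega)
  have hge : v ≤ N / k := by
    refine (Nat.le_div_iff_mul_le (by omega : 0 < k)).2 ?_
    rw [Nat.mul_comm]
    exact (Nat.le_div_iff_mul_le hv1).1 hk2
  omega

lemma block_sum (N a : ℕ) (ha : a < N) :
    (∑ k ∈ Finset.Ioc a (N / (N / (a + 1))), k ^ 2 * (N / k) : ℕ)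
      = (∑ j ∈ Finset.Ioc a (N / (N / (a + 1))), j ^ 2) * (N / (a + 1)) := by
  rw [Finset.sum_mul]
  refine Finset.sum_congr rfl (fun k hk => ?_)
  rw [Finset.mem_Ioc] at hk
  rw [div_const_on_block N a k ha (by omega) hk.2]

-- ===== B-side: the block loop computes Ssum N mod 10^9 =====
lemma blockLoop_inv (N : ℕ) : ∀ (fuel a : ℕ) (total : ℤ), N ≤ a + fuel →
    0 ≤ total → total < 10 ^ 9 →
    blockLoop fuel (N : ℤ) ((a : ℤ) + 1) total
      = (total + ((∑ k ∈ Finset.Ioc a N, k ^ 2 * (N / k) : ℕ) : ℤ)) % 10 ^ 9 := by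
  intro fuel
  induction fuel with
  | zero =>
    intro a total hfa h0 h1
    have he : Finset.Ioc a N = ∅ := by apply Finset.Ioc_eq_empty; omega
    rw [blockLoop, he]
    simp
    exact (Int.emod_eq_of_lt h0 h1).symm
  | succ fuel ih =>
    intro a total hfa h0 h1
    by_cases hlt : a < N
    · have hcond : ((a : ℤ) + 1) ≤ (N : ℤ) := by exact_mod_cast hlt
      rw [blockLoop, if_pos hcond]
      set v : ℕ := N / (a + 1) with hv
      have hv1 : 1 ≤ v := (Nat.one_le_div_iff (by omega)).2 (by omega)
      set h' : ℕ := N / v with hh'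
      have hah : a + 1 ≤ h' := by
        rw [hh']
        refine (Nat.le_div_iff_mul_le (by omega : 0 < v)).2 ?_
        rw [Nat.mul_comm, hv]
        exact Nat.div_mul_le_self N (a + 1)
      have hhN : h' ≤ N := Nat.div_le_self N v
      have e1 : PySem.Int.floordiv (N : ℤ) ((a : ℤ) + 1) = (v : ℤ) := by
        rw [show ((a : ℤ) + 1) = ((a + 1 : ℕ) : ℤ) by push_cast; ring,
            PySem.Int.floordiv_natCast]
      have e3 : fAlt ((a : ℤ) + 1 - 1) = (sqSum a : ℤ) := by
        rw [show ((a : ℤ) + 1 - 1) = ((a : ℕ) : ℤ) by ring, fAlt_cast]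
      rw [e1, PySem.Int.floordiv_natCast, e3, fAlt_cast]
      have e4 : (v : ℤ) * ((sqSum h' : ℤ) - (sqSum a : ℤ))
          = ((∑ k ∈ Finset.Ioc a h', k ^ 2 * (N / k) : ℕ) : ℤ) := by
        have hs := sqSum_split a h' (by omega)
        have hb := block_sum N a hlt
        rw [← hv, ← hh'] at hb
        rw [show ((sqSum h' : ℤ) - (sqSum a : ℤ)) = ((∑ j ∈ Finset.Ioc a h', j ^ 2 : ℕ) : ℤ) by
              push_cast [← hs]; ring,
            show ((v : ℕ) : ℤ) * ((∑ j ∈ Finset.Ioc a h', j ^ 2 : ℕ) : ℤ)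
                = (((∑ j ∈ Finset.Ioc a h', j ^ 2) * v : ℕ) : ℤ) by push_cast; ring,
            hb]
      rw [e4]
      have hmodpos : (0 : ℤ) < 10 ^ 9 := by norm_num
      rw [PySem.Int.mod_eq_emod_of_pos hmodpos,
          show ((h' : ℤ) + 1) = ((h' : ℕ) : ℤ) + 1 by norm_num,
          ih h' _ (by omega) (Int.emod_nonneg _ (by norm_num)) (Int.emod_lt_of_pos _ hmodpos)]
      have hsplit : (∑ k ∈ Finset.Ioc a h', k ^ 2 * (N / k))
          + (∑ k ∈ Finset.Ioc h' N, k ^ 2 * (N / k))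
          = ∑ k ∈ Finset.Ioc a N, k ^ 2 * (N / k) :=
        Finset.sum_Ioc_consecutive _ (by omega) hhN
      have hsplit' : ((∑ k ∈ Finset.Ioc a h', k ^ 2 * (N / k) : ℕ) : ℤ)
          + ((∑ k ∈ Finset.Ioc h' N, k ^ 2 * (N / k) : ℕ) : ℤ)
          = ((∑ k ∈ Finset.Ioc a N, k ^ 2 * (N / k) : ℕ) : ℤ) := by exact_mod_cast hsplit
      have h9 : ((10 : ℤ) ^ 9) = 1000000000 := by norm_num
      rw [h9] at *
      omega
    · rw [blockLoop, if_neg (by exact_mod_cast (by omega : ¬ ((a : ℤ) + 1 ≤ (N : ℤ))))]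
      have he : Finset.Ioc a N = ∅ := by apply Finset.Ioc_eq_empty; omega
      rw [he]
      simp
      exact (Int.emod_eq_of_lt h0 h1).symm

lemma compute_alt_eq (N : ℕ) : compute_alt (N : ℤ) = ((Ssum N % 1000000000 : ℕ) : ℤ) := by
  unfold compute_alt
  rw [Int.toNat_natCast, show (1 : ℤ) = ((0 : ℕ) : ℤ) + 1 by norm_num,
      blockLoop_inv N (N + 1) 0 0 (by omega) (by norm_num) (by norm_num), ← Ssum,
      zero_add, show ((10 : ℤ) ^ 9) = ((1000000000 : ℕ) : ℤ) by norm_num, ← Int.natCast_mod]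

-- ===== the hyperbola identity =====

lemma filter_mul_le (N c : ℕ) (hc : 0 < c) :
    (Finset.Ioc 0 N).filter (fun x => x * c ≤ N) = Finset.Ioc 0 (N / c) := by
  ext x
  simp only [Finset.mem_filter, Finset.mem_Ioc]
  constructor
  · rintro ⟨⟨h1, _⟩, h3⟩
    exact ⟨h1, (Nat.le_div_iff_mul_le hc).2 h3⟩
  · rintro ⟨h1, h2⟩
    have h3 := (Nat.le_div_iff_mul_le hc).1 h2
    have : x ≤ N := by nlinarith
    exact ⟨⟨h1, this⟩, h3⟩

-- P = pairs (k, m) with 1 ≤ k, 1 ≤ m, k*m ≤ N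
def Pset (N : ℕ) : Finset (ℕ × ℕ) :=
  (Finset.Ioc 0 N ×ˢ Finset.Ioc 0 N).filter (fun p => p.1 * p.2 ≤ N)

lemma Pset_filter_sum (N : ℕ) (q : ℕ × ℕ → Prop) [DecidablePred q] :
    ∑ p ∈ (Pset N).filter q, p.1 ^ 2
      = ∑ k ∈ Finset.Ioc 0 N, ∑ m ∈ Finset.Ioc 0 N,
          if k * m ≤ N ∧ q (k, m) then k ^ 2 else 0 := by
  rw [Pset, Finset.filter_filter, Finset.sum_filter, Finset.sum_product]

lemma Ssum_pairs (N : ℕ) : Ssum N = ∑ p ∈ Pset N, p.1 ^ 2 := by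
  rw [Pset, Finset.sum_filter, Finset.sum_product, Ssum]
  refine Finset.sum_congr rfl (fun k hk => ?_)
  rw [Finset.mem_Ioc] at hk
  rw [← Finset.sum_filter,
      show (Finset.Ioc 0 N).filter (fun m => (k, m).1 * m ≤ N)
          = (Finset.Ioc 0 N).filter (fun m => m * k ≤ N) by
        apply Finset.filter_congr; intro m _; simp [Nat.mul_comm],
      filter_mul_le N k hk.1,
      show (∑ a ∈ Finset.Ioc 0 (N / k), (k, a).1 ^ 2)
          = ∑ _a ∈ Finset.Ioc 0 (N / k), k ^ 2 from rfl,
      Finset.sum_const, Nat.card_Ioc, Nat.sub_zero, smul_eq_mul]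
  ring

lemma part_le (N : ℕ) :
    ∑ p ∈ (Pset N).filter (fun p => p.2 ≤ Nat.sqrt N), p.1 ^ 2
      = ∑ m ∈ Finset.Ioc 0 (Nat.sqrt N), sqSum (N / m) := by
  rw [Pset_filter_sum, Finset.sum_comm]
  rw [← Finset.sum_subset (Finset.Ioc_subset_Ioc_right (Nat.sqrt_le_self N))
        (fun m hmN hm => Finset.sum_eq_zero (fun k _ => by
          rw [if_neg]
          rintro ⟨-, hms⟩
          rw [Finset.mem_Ioc] at hmN
          exact hm (Finset.mem_Ioc.mpr ⟨hmN.1, hms⟩)))]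
  refine Finset.sum_congr rfl (fun m hm => ?_)
  rw [Finset.mem_Ioc] at hm
  calc (∑ k ∈ Finset.Ioc 0 N, if k * m ≤ N ∧ (k, m).2 ≤ Nat.sqrt N then k ^ 2 else 0)
      = ∑ k ∈ Finset.Ioc 0 N, if k * m ≤ N then k ^ 2 else 0 := by
        refine Finset.sum_congr rfl (fun k _ => ?_)
        by_cases h : k * m ≤ N
        · rw [if_pos (⟨h, hm.2⟩ : k * m ≤ N ∧ (k, m).2 ≤ Nat.sqrt N), if_pos h]
        · rw [if_neg (by rintro ⟨h1, -⟩; exact h h1), if_neg h]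
    _ = sqSum (N / m) := by
        rw [← Finset.sum_filter, filter_mul_le N m hm.1, sqSum]

lemma part_gt (N : ℕ) :
    (∑ p ∈ (Pset N).filter (fun p => ¬ p.2 ≤ Nat.sqrt N), p.1 ^ 2)
        + Nat.sqrt N * sqSum (Nat.sqrt N)
      = ∑ k ∈ Finset.Ioc 0 (Nat.sqrt N), k ^ 2 * (N / k) := by
  set s := Nat.sqrt N with hsdef
  have hs2 : s * s ≤ N := by nlinarith [Nat.sqrt_le' N]
  have hlt : N < (s + 1) * (s + 1) := Nat.lt_succ_sqrt N
  rw [Pset_filter_sum]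
  rw [← Finset.sum_subset (Finset.Ioc_subset_Ioc_right (Nat.sqrt_le_self N))
        (fun k hkN hk => Finset.sum_eq_zero (fun m hmN => by
          rw [if_neg]
          rintro ⟨h1, h2⟩
          have h1' : k * m ≤ N := h1
          have h2' : ¬ m ≤ s := h2
          rw [Finset.mem_Ioc] at hkN hmN
          have hks : ¬ (0 < k ∧ k ≤ s) := fun h => hk (Finset.mem_Ioc.mpr h)
          have h5 : (s + 1) * (s + 1) ≤ k * m := Nat.mul_le_mul (by omega) (by omega)
          omega))]
  have hmain : ∀ k ∈ Finset.Ioc 0 s,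
      (∑ m ∈ Finset.Ioc 0 N, if k * m ≤ N ∧ ¬ (k, m).2 ≤ s then k ^ 2 else 0)
        = (N / k - s) * k ^ 2 := by
    intro k hk
    rw [Finset.mem_Ioc] at hk
    show (∑ m ∈ Finset.Ioc 0 N, if k * m ≤ N ∧ ¬ m ≤ s then k ^ 2 else 0)
        = (N / k - s) * k ^ 2
    have hfil : (Finset.Ioc 0 N).filter (fun m => k * m ≤ N ∧ ¬ m ≤ s)
        = Finset.Ioc s (N / k) := by
      ext m
      simp only [Finset.mem_filter, Finset.mem_Ioc, not_le]
      constructor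
      · rintro ⟨⟨-, -⟩, h3, h4⟩
        refine ⟨h4, (Nat.le_div_iff_mul_le hk.1).2 (by rw [Nat.mul_comm]; exact h3)⟩
      · rintro ⟨h1, h2⟩
        have h3 := (Nat.le_div_iff_mul_le hk.1).1 h2
        have hmN : m ≤ N := by nlinarith
        exact ⟨⟨by omega, hmN⟩, by rw [Nat.mul_comm]; exact h3, by omega⟩
    rw [← Finset.sum_filter, hfil, Finset.sum_const, Nat.card_Ioc, smul_eq_mul]
  rw [Finset.sum_congr rfl hmain, show s * sqSum s = ∑ k ∈ Finset.Ioc 0 s, s * k ^ 2 by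
        rw [sqSum, Finset.mul_sum], ← Finset.sum_add_distrib]
  refine Finset.sum_congr rfl (fun k hk => ?_)
  rw [Finset.mem_Ioc] at hk
  have hsk : s ≤ N / k := by
    have h1 : N / s ≤ N / k := Nat.div_le_div_left hk.2 hk.1
    have h2 : s ≤ N / s := by
      rcases Nat.eq_zero_or_pos s with h | h
      · omega
      · exact (Nat.le_div_iff_mul_le h).2 hs2
    omega
  rw [← Nat.add_mul, show N / k - s + s = N / k by omega]
  ring

lemma hyperbola (N : ℕ) :
    (∑ k ∈ Finset.Ioc 0 (Nat.sqrt N), (sqSum (N / k) + k ^ 2 * (N / k)))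
      = Nat.sqrt N * sqSum (Nat.sqrt N) + Ssum N := by
  have h0 := Finset.sum_filter_add_sum_filter_not (Pset N)
    (fun p => p.2 ≤ Nat.sqrt N) (fun p => p.1 ^ 2)
  have h1 := part_le N
  have h2 := part_gt N
  have h3 := Ssum_pairs N
  rw [Finset.sum_add_distrib]
  omega

-- ===== A-side: the fold computes the hyperbola partial sums mod 10^9 =====
lemma A_fold (N : ℕ) (j : ℕ) :
    (PySem.List.pyRange 1 ((j : ℤ) + 1) 1).foldl
      (fun total k =>
        PySem.Int.mod
          (total + PySem.Int.mod (f (PySem.Int.floordiv (N : ℤ) k)) (10 ^ 9)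
             + PySem.Int.powMod k 2 (10 ^ 9) * PySem.Int.floordiv (N : ℤ) k)
          (10 ^ 9)) 0
    = (((∑ k ∈ Finset.Ioc 0 j, (sqSum (N / k) + k ^ 2 * (N / k))) % 1000000000 : ℕ) : ℤ) := by
  induction j with
  | zero =>
    rw [show ((0 : ℕ) : ℤ) + 1 = 1 by norm_num, PySem.List.pyRange_one_eq_nil (le_refl 1)]
    simp
  | succ j ih =>
    rw [show (((j + 1 : ℕ) : ℤ) + 1) = ((j : ℤ) + 1) + 1 by push_cast; ring,
        PySem.List.pyRange_one_succ_right (by omega : (1 : ℤ) ≤ (j : ℤ) + 1),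
        List.foldl_append, ih, List.foldl_cons, List.foldl_nil]
    have d1 : PySem.Int.floordiv (N : ℤ) ((j : ℤ) + 1) = ((N / (j + 1) : ℕ) : ℤ) := by
      rw [show ((j : ℤ) + 1) = ((j + 1 : ℕ) : ℤ) by push_cast; ring, PySem.Int.floordiv_natCast]
    rw [d1, f_cast]
    have d2 : PySem.Int.mod ((sqSum (N / (j + 1)) : ℕ) : ℤ) (10 ^ 9)
        = ((sqSum (N / (j + 1)) % 1000000000 : ℕ) : ℤ) := by
      rw [show ((10 : ℤ) ^ 9) = ((1000000000 : ℕ) : ℤ) by norm_num, PySem.Int.mod_natCast]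
    have d3 : PySem.Int.powMod ((j : ℤ) + 1) 2 (10 ^ 9)
        = (((j + 1) ^ 2 % 1000000000 : ℕ) : ℤ) := by
      simp only [PySem.Int.powMod]
      rw [show (((j : ℤ) + 1) ^ 2) = (((j + 1) ^ 2 : ℕ) : ℤ) by push_cast; ring,
          show ((10 : ℤ) ^ 9) = ((1000000000 : ℕ) : ℤ) by norm_num, PySem.Int.mod_natCast]
    rw [d2, d3]
    rw [show ((((∑ k ∈ Finset.Ioc 0 j, (sqSum (N / k) + k ^ 2 * (N / k))) % 1000000000 : ℕ) : ℤ)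
          + ((sqSum (N / (j + 1)) % 1000000000 : ℕ) : ℤ)
          + (((j + 1) ^ 2 % 1000000000 : ℕ) : ℤ) * ((N / (j + 1) : ℕ) : ℤ))
        = ((((∑ k ∈ Finset.Ioc 0 j, (sqSum (N / k) + k ^ 2 * (N / k))) % 1000000000
              + sqSum (N / (j + 1)) % 1000000000
              + ((j + 1) ^ 2 % 1000000000) * (N / (j + 1)) : ℕ)) : ℤ) by push_cast; ring,
        show ((10 : ℤ) ^ 9) = ((1000000000 : ℕ) : ℤ) by norm_num, PySem.Int.mod_natCast]
    congr 1
    rw [Finset.sum_Ioc_succ_top (Nat.zero_le _)]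
    have hm : ((∑ k ∈ Finset.Ioc 0 j, (sqSum (N / k) + k ^ 2 * (N / k))) % 1000000000
          + sqSum (N / (j + 1)) % 1000000000
          + ((j + 1) ^ 2 % 1000000000) * (N / (j + 1)))
        ≡ ((∑ k ∈ Finset.Ioc 0 j, (sqSum (N / k) + k ^ 2 * (N / k)))
          + sqSum (N / (j + 1)) + (j + 1) ^ 2 * (N / (j + 1))) [MOD 1000000000] :=
      (((Nat.mod_modEq _ _).add (Nat.mod_modEq _ _)).add
        ((Nat.mod_modEq _ _).mul (Nat.ModEq.refl _)))
    have := hm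
    unfold Nat.ModEq at this
    omega

lemma compute_eq (N : ℕ) : compute (N : ℤ) = ((Ssum N % 1000000000 : ℕ) : ℤ) := by
  show PySem.Int.mod
      ((PySem.List.pyRange 1 (Int.sqrt (N : ℤ) + 1) 1).foldl
        (fun total k =>
          PySem.Int.mod
            (total + PySem.Int.mod (f (PySem.Int.floordiv (N : ℤ) k)) (10 ^ 9)
               + PySem.Int.powMod k 2 (10 ^ 9) * PySem.Int.floordiv (N : ℤ) k)
            (10 ^ 9)) 0
        - Int.sqrt (N : ℤ) * f (Int.sqrt (N : ℤ))) (10 ^ 9)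
      = ((Ssum N % 1000000000 : ℕ) : ℤ)
  have hs : Int.sqrt (N : ℤ) = ((Nat.sqrt N : ℕ) : ℤ) := by simp [Int.sqrt]
  rw [hs, A_fold, f_cast,
      PySem.Int.mod_eq_emod_of_pos (by norm_num : (0 : ℤ) < 10 ^ 9)]
  have hhyp := hyperbola N
  have c1 : (((∑ k ∈ Finset.Ioc 0 (Nat.sqrt N), (sqSum (N / k) + k ^ 2 * (N / k)))
        % 1000000000 : ℕ) : ℤ)
      = (((∑ k ∈ Finset.Ioc 0 (Nat.sqrt N), (sqSum (N / k) + k ^ 2 * (N / k))) : ℕ) : ℤ)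
        % 1000000000 := by exact_mod_cast Int.natCast_mod _ 1000000000
  have c2 : (((∑ k ∈ Finset.Ioc 0 (Nat.sqrt N), (sqSum (N / k) + k ^ 2 * (N / k))) : ℕ) : ℤ)
      = ((Nat.sqrt N * sqSum (Nat.sqrt N) : ℕ) : ℤ) + ((Ssum N : ℕ) : ℤ) := by
    exact_mod_cast hhyp
  have c3 : ((Ssum N % 1000000000 : ℕ) : ℤ) = ((Ssum N : ℕ) : ℤ) % 1000000000 := by
    exact_mod_cast Int.natCast_mod _ 1000000000
  have c4 : ((Nat.sqrt N : ℕ) : ℤ) * ((sqSum (Nat.sqrt N) : ℕ) : ℤ)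
      = ((Nat.sqrt N * sqSum (Nat.sqrt N) : ℕ) : ℤ) := by push_cast; ring
  rw [c1, c4, show ((10 : ℤ) ^ 9) = 1000000000 by norm_num, c3]
  omega

-- ===== VERDICT (by name: the statement is the Claim_ definition above) =====
theorem compute_spec : Claim_equal_compute := by
  intro n _ hpre
  unfold Spec_compute
  lift n to ℕ using hpre
  rw [compute_eq, compute_alt_eq]
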